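-- pv_equiv track=rewrite | github.com/Raf4morim/TPR | Guioes/Assigm2/baseCode2/basePktFeaturesExt.py | extractSilenceActivity
-- ===== SOURCE A (Python) =====
-- def extractSilenceActivity(data,threshold=0):
--     if(data[0]<=threshold):
--         s=[1]
--         a=[]
--     else:
--         s=[]
--         a=[1]
--     for i in range(1,len(data)):
--         if(data[i-1]>threshold and data[i]<=threshold):
--             s.append(1)
--         elif(data[i-1]<=threshold and data[i]>threshold):
--             a.append(1)
--         elif (data[i-1]<=threshold and data[i]<=threshold):
--             s[-1]+=1
--         else:
--             a[-1]+=1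
--     return(s,a)
-- ===== SOURCE B (Python) =====
-- def extractSilenceActivity(data, threshold=0):
--     # Run-splitting: find each maximal run of same-keyed elements and record
--     # its length once, instead of a transition-detecting state machine.
--     s, a = [], []
--     n = len(data)
--     i = 0
--     while i < n:
--         key = data[i] <= threshold
--         j = i + 1
--         while j < n and (data[j] <= threshold) == key:
--             j += 1
--         if key:
--             s.append(j - i)
--         else:
--             a.append(j - i)
--         i = j
--     return (s, a)
-- ===== Notes on version B (the rewrite author's own statement) =====
-- stated objective: alternative
-- what changed: B splits the data into maximal runs (scanning each run once and appending its full length) instead of A's transition-detecting state machine that compares each element to its predecessor and mutates the last list entry.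
import Mathlib
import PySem

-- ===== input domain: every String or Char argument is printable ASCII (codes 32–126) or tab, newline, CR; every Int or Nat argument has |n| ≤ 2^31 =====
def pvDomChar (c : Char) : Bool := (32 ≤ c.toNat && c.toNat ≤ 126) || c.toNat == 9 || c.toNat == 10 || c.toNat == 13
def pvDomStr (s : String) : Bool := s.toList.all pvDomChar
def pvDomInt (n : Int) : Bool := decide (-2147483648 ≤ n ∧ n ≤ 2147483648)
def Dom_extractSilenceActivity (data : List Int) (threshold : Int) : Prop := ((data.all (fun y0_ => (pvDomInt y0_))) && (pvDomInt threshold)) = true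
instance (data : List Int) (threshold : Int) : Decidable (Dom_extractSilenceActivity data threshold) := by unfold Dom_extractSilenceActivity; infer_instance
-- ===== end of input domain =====

-- B splits the data into maximal runs and records each run's length once, instead of
-- A's transition-detecting state machine; same O(n) cost, alternative decomposition.


-- ===== PORT A =====
-- s[-1] += 1 ; on [] Python raises IndexError, which is unreachable in A (the last
-- run's entry always exists when this branch fires), so the [] case is arbitrary.
def pvIncLast : List Int → List Int
  | [] => []
  | [c] => [c + 1]
  | x :: y :: r => x :: pvIncLast (y :: r)

-- the for-loop over i in range(1, len(data)): prev carries data[i-1], the list the suffix data[i:]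
def pvLoopA (t prev : Int) (s a : List Int) : List Int → List Int × List Int
  | [] => (s, a)
  | x :: xs =>
    if prev > t ∧ x ≤ t then pvLoopA t x (s ++ [1]) a xs
    else if prev ≤ t ∧ x > t then pvLoopA t x s (a ++ [1]) xs
    else if prev ≤ t ∧ x ≤ t then pvLoopA t x (pvIncLast s) a xs
    else pvLoopA t x s (pvIncLast a) xs

def extractSilenceActivity (data : List Int) (threshold : Int) : List Int × List Int :=
  match data with
  | [] => ([], [])   -- Python raises IndexError on data[0]; excluded by Pre_
  | d0 :: rest =>
    if d0 ≤ threshold then pvLoopA threshold d0 [1] [] rest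
    else pvLoopA threshold d0 [] [1] rest

-- ===== PORT B =====
-- outer while: the suffix data[i:]; inner while computing j: takeWhile/dropWhile; appends j - i = run length
def pvLoopB (t : Int) (s a : List Int) : List Int → List Int × List Int
  | [] => (s, a)
  | x :: xs =>
    let run := xs.takeWhile (fun y => decide (y ≤ t) == decide (x ≤ t))
    let rest := xs.dropWhile (fun y => decide (y ≤ t) == decide (x ≤ t))
    if x ≤ t then pvLoopB t (s ++ [(run.length : Int) + 1]) a rest
    else pvLoopB t s (a ++ [(run.length : Int) + 1]) rest
termination_by l => l.length
decreasing_by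
  all_goals simpa using Nat.lt_succ_of_le (xs.length_dropWhile_le _)

def extractSilenceActivity_alt (data : List Int) (threshold : Int) : List Int × List Int :=
  pvLoopB threshold [] [] data

-- ===== PRECONDITION & SPEC =====
-- Pre_ excludes only the empty list, on which Python A raises IndexError (data[0]).
def Pre_extractSilenceActivity (data : List Int) (threshold : Int) : Prop := data ≠ []
instance (data : List Int) (threshold : Int) : Decidable (Pre_extractSilenceActivity data threshold) := by unfold Pre_extractSilenceActivity; infer_instance
def pvWitness_extractSilenceActivity : List Int × Int := ([1, 2, 0, 0, 3], 1)

def Spec_extractSilenceActivity (data : List Int) (threshold : Int) (out : List Int × List Int) : Prop := out = extractSilenceActivity_alt data threshold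
instance (data : List Int) (threshold : Int) (out : List Int × List Int) : Decidable (Spec_extractSilenceActivity data threshold out) := by unfold Spec_extractSilenceActivity; infer_instance

-- ===== CLAIM (what is proved, stated in full; the proofs are below) =====
def Claim_equal_extractSilenceActivity : Prop := ∀ (data : List Int) (threshold : Int), Dom_extractSilenceActivity data threshold → Pre_extractSilenceActivity data threshold → Spec_extractSilenceActivity data threshold (extractSilenceActivity data threshold)

-- ===== LEMMAS AND PROOFS =====

theorem pvLoopB_nil (t : Int) (s a : List Int) : pvLoopB t s a [] = (s, a) := by
  rw [pvLoopB.eq_def]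

theorem pvLoopB_cons (t : Int) (s a : List Int) (x : Int) (xs : List Int) :
    pvLoopB t s a (x :: xs) =
      (if x ≤ t then
        pvLoopB t (s ++ [((xs.takeWhile (fun y => decide (y ≤ t) == decide (x ≤ t))).length : Int) + 1]) a
          (xs.dropWhile (fun y => decide (y ≤ t) == decide (x ≤ t)))
      else
        pvLoopB t s (a ++ [((xs.takeWhile (fun y => decide (y ≤ t) == decide (x ≤ t))).length : Int) + 1])
          (xs.dropWhile (fun y => decide (y ≤ t) == decide (x ≤ t)))) := by
  rw [pvLoopB.eq_def]

theorem pvIncLast_append (s0 : List Int) (c : Int) :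
    pvIncLast (s0 ++ [c]) = s0 ++ [c + 1] := by
  induction s0 with
  | nil => rfl
  | cons x s0 ih =>
    cases s0 with
    | nil => rfl
    | cons y r => simpa [pvIncLast] using ih

-- mid-run invariant: A's state machine, continuing the current run, equals B's
-- run-splitting loop once the current run's length is merged into the open slot.
theorem pvLoop_invariant (t : Int) (xs : List Int) :
    (∀ prev s0 c a, prev ≤ t →
      pvLoopA t prev (s0 ++ [c]) a xs =
        pvLoopB t (s0 ++ [c + ((xs.takeWhile (fun y => decide (y ≤ t))).length : Int)]) a
          (xs.dropWhile (fun y => decide (y ≤ t)))) ∧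
    (∀ prev s a0 c, ¬ prev ≤ t →
      pvLoopA t prev s (a0 ++ [c]) xs =
        pvLoopB t s (a0 ++ [c + ((xs.takeWhile (fun y => !decide (y ≤ t))).length : Int)])
          (xs.dropWhile (fun y => !decide (y ≤ t)))) := by
  induction xs with
  | nil => constructor <;> intro _ _ _ _ _ <;> simp [pvLoopA, pvLoopB_nil]
  | cons x xs ih =>
    obtain ⟨ihS, ihA⟩ := ih
    constructor
    · intro prev s0 c a hprev
      by_cases hx : x ≤ t
      · rw [show pvLoopA t prev (s0 ++ [c]) a (x :: xs)
              = pvLoopA t x (pvIncLast (s0 ++ [c])) a xs by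
            simp [pvLoopA, hprev, hx, not_lt.mpr hprev]]
        rw [pvIncLast_append, ihS x s0 (c + 1) a hx]
        simp [List.takeWhile, List.dropWhile, hx]
        ring_nf
      · rw [show pvLoopA t prev (s0 ++ [c]) a (x :: xs)
              = pvLoopA t x (s0 ++ [c]) (a ++ [1]) xs by
            simp [pvLoopA, hprev, hx, not_lt.mpr hprev, lt_of_not_ge hx]]
        rw [ihA x (s0 ++ [c]) a 1 hx]
        rw [show (x :: xs).dropWhile (fun y => decide (y ≤ t)) = x :: xs by
            simp [List.dropWhile, hx]]
        rw [show (x :: xs).takeWhile (fun y => decide (y ≤ t)) = [] by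
            simp [List.takeWhile, hx]]
        rw [pvLoopB_cons]
        simp only [if_neg hx]
        have he : (fun y => decide (y ≤ t) == decide (x ≤ t)) = (fun y => !decide (y ≤ t)) := by
          funext y; simp [hx]
        rw [he]
        norm_num [add_comm]
    · intro prev s a0 c hprev
      by_cases hx : x ≤ t
      · rw [show pvLoopA t prev s (a0 ++ [c]) (x :: xs)
              = pvLoopA t x (s ++ [1]) (a0 ++ [c]) xs by
            simp [pvLoopA, hx, lt_of_not_ge hprev]]
        rw [ihS x s 1 (a0 ++ [c]) hx]
        rw [show (x :: xs).dropWhile (fun y => !decide (y ≤ t)) = x :: xs by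
            simp [List.dropWhile, hx]]
        rw [show (x :: xs).takeWhile (fun y => !decide (y ≤ t)) = [] by
            simp [List.takeWhile, hx]]
        rw [pvLoopB_cons]
        simp only [if_pos hx]
        have he : (fun y => decide (y ≤ t) == decide (x ≤ t)) = (fun y => decide (y ≤ t)) := by
          funext y; simp [hx]
        rw [he]
        norm_num [add_comm]
      · rw [show pvLoopA t prev s (a0 ++ [c]) (x :: xs)
              = pvLoopA t x s (pvIncLast (a0 ++ [c])) xs by
            simp [pvLoopA, hprev, hx, lt_of_not_ge hprev, lt_of_not_ge hx]]
        rw [pvIncLast_append, ihA x s a0 (c + 1) hx]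
        simp [List.takeWhile, List.dropWhile, hx]
        ring_nf

-- ===== VERDICT (by name: the statement is the Claim_ definition above) =====
theorem extractSilenceActivity_spec : Claim_equal_extractSilenceActivity := by
  intro data t _ hpre
  unfold Spec_extractSilenceActivity
  cases data with
  | nil => exact absurd rfl hpre
  | cons d0 rest =>
    obtain ⟨ihS, ihA⟩ := pvLoop_invariant t rest
    simp only [extractSilenceActivity, extractSilenceActivity_alt]
    rw [pvLoopB_cons]
    by_cases h0 : d0 ≤ t
    · rw [if_pos h0, if_pos h0]
      have := ihS d0 [] 1 [] h0
      simp only [List.nil_append] at this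
      rw [this]
      have he : (fun y => decide (y ≤ t) == decide (d0 ≤ t)) = (fun y => decide (y ≤ t)) := by
        funext y; simp [h0]
      simp only [he, List.nil_append]
      ring_nf
    · rw [if_neg h0, if_neg h0]
      have := ihA d0 [] [] 1 h0
      simp only [List.nil_append] at this
      rw [this]
      have he : (fun y => decide (y ≤ t) == decide (d0 ≤ t)) = (fun y => !decide (y ≤ t)) := by
        funext y; simp [h0]
      simp only [he, List.nil_append]
      ring_nf
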